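-- pv_equiv track=rewrite | github.com/Axym-Labs/pptrain | src/pptrain/reference_parity_exporters.py | _split_reference_sections
-- ===== SOURCE A (Python) =====
-- from typing import Any, Callable, Sequence
--
-- def _split_reference_sections(input_ids: Sequence[int], separator_token_id: int) -> list[list[int]]:
--     sections: list[list[int]] = []
--     current: list[int] = []
--     for token in input_ids:
--         value = int(token)
--         if value == separator_token_id:
--             sections.append(current)
--             current = []
--         else:
--             current.append(value)
--     sections.append(current)
--     return sections
-- ===== SOURCE B (Python) =====
-- def _split_reference_sections(input_ids, separator_token_id):
--     values = [int(t) for t in input_ids]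
--     sections = []
--     start = 0
--     while True:
--         try:
--             pos = values.index(separator_token_id, start)
--         except ValueError:
--             sections.append(values[start:])
--             return sections
--         sections.append(values[start:pos])
--         start = pos + 1
-- ===== Notes on version B (the rewrite author's own statement) =====
-- stated objective: alternative
-- what changed: Replaces the per-token accumulate-and-flush loop with a find-next-separator-index-then-slice loop (list.index with a start offset plus slicing), so sections are produced as whole slices instead of element-by-element appends.
import Mathlib
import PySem

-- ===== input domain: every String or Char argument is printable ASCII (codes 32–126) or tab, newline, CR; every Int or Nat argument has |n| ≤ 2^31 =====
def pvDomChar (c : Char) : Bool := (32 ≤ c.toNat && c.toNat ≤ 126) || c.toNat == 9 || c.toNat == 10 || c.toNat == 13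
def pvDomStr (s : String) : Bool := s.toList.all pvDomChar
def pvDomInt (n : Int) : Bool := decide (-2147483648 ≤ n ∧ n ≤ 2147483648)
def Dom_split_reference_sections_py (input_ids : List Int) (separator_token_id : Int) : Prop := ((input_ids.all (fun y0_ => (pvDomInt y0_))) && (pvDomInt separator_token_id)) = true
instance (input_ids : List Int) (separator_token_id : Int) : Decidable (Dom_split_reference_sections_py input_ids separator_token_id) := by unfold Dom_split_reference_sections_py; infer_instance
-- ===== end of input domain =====

-- B rebuilds the sections by repeatedly finding the next separator index and slicing,
-- instead of A's per-token accumulate-and-flush loop; objective: alternative decomposition.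

-- ===== PORT A =====
-- for token in input_ids: value = int(token); if value == sep: flush current else append
def split_reference_sections_py (input_ids : List Int) (separator_token_id : Int) : List (List Int) :=
  let st := input_ids.foldl
    (fun (st : List (List Int) × List Int) token =>
      if token = separator_token_id then (st.1 ++ [st.2], ([] : List Int))
      else (st.1, st.2 ++ [token]))
    (([] : List (List Int)), ([] : List Int))
  st.1 ++ [st.2]

-- ===== PORT B =====
-- termination helper for the index-search loop (cited by decreasing_by)
theorem pv_index?_lt_length {xs : List Int} {v : Int} {j : Nat}
    (h : PySem.List.index? xs v = some j) : j < xs.length := by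
  rw [PySem.List.index?_eq_some_iff] at h
  obtain ⟨pre, suf, hxs, hlen, -⟩ := h
  subst hxs; simp [← hlen]

-- values.index(sep, start) searches from offset start; ported exactly as index? on
-- values.drop start (relative index j, absolute pos = start + j), slices via PySem.List.slice.
def pvAltGo (values : List Int) (sep : Int) (start : Nat) (sections : List (List Int)) :
    List (List Int) :=
  match h : PySem.List.index? (values.drop start) sep with
  | none => sections ++ [PySem.List.slice values (some (start : Int)) none]
  | some j =>
      pvAltGo values sep (start + j + 1)
        (sections ++ [PySem.List.slice values (some (start : Int)) (some ((start + j : Nat) : Int))])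
termination_by values.length - start
decreasing_by
  have := pv_index?_lt_length h
  simp [List.length_drop] at this
  omega

def split_reference_sections_py_alt (input_ids : List Int) (separator_token_id : Int) :
    List (List Int) :=
  let values := input_ids
  pvAltGo values separator_token_id 0 []

-- ===== PRECONDITION & SPEC =====
def Spec_split_reference_sections_py (input_ids : List Int) (separator_token_id : Int) (out : List (List Int)) : Prop := out = split_reference_sections_py_alt input_ids separator_token_id
instance (input_ids : List Int) (separator_token_id : Int) (out : List (List Int)) : Decidable (Spec_split_reference_sections_py input_ids separator_token_id out) := by unfold Spec_split_reference_sections_py; infer_instance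

-- ===== CLAIM (what is proved, stated in full; the proofs are below) =====
def Claim_equal_split_reference_sections_py : Prop := ∀ (input_ids : List Int) (separator_token_id : Int), Dom_split_reference_sections_py input_ids separator_token_id → Spec_split_reference_sections_py input_ids separator_token_id (split_reference_sections_py input_ids separator_token_id)

-- ===== LEMMAS AND PROOFS =====

-- reference splitter both ports are reduced to
def pvS (sep : Int) : List Int → List (List Int)
  | [] => [[]]
  | t :: ts =>
    if t = sep then [] :: pvS sep ts
    else match pvS sep ts with
      | [] => [[t]]
      | h :: tl => (t :: h) :: tl

theorem pvS_ne_nil (sep : Int) (l : List Int) : pvS sep l ≠ [] := by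
  cases l with
  | nil => simp [pvS]
  | cons t ts =>
    simp only [pvS]
    split_ifs
    · simp
    · cases pvS sep ts <;> simp

def pvConsAll (cur : List Int) : List (List Int) → List (List Int)
  | [] => [cur]
  | h :: tl => (cur ++ h) :: tl

theorem pvA_fold (sep : Int) (l : List Int) :
    ∀ (secs : List (List Int)) (cur : List Int),
      (let st := l.foldl
        (fun (st : List (List Int) × List Int) token =>
          if token = sep then (st.1 ++ [st.2], ([] : List Int))
          else (st.1, st.2 ++ [token])) (secs, cur)
       st.1 ++ [st.2]) = secs ++ pvConsAll cur (pvS sep l) := by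
  induction l with
  | nil => intro secs cur; simp [pvS, pvConsAll]
  | cons t ts ih =>
    intro secs cur
    simp only [List.foldl_cons]
    by_cases ht : t = sep
    · simp only [ht]
      rw [ih]
      have hne := pvS_ne_nil sep ts
      cases hS : pvS sep ts with
      | nil => exact absurd hS hne
      | cons h tl => simp [pvS, hS, pvConsAll]
    · simp only [if_neg ht]
      rw [ih]
      cases hS : pvS sep ts with
      | nil => exact absurd hS (pvS_ne_nil sep ts)
      | cons h tl => simp [pvS, ht, hS, pvConsAll]

theorem pvA_eq_pvS (input_ids : List Int) (sep : Int) :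
    split_reference_sections_py input_ids sep = pvS sep input_ids := by
  unfold split_reference_sections_py
  rw [pvA_fold sep input_ids [] []]
  have hne := pvS_ne_nil sep input_ids
  cases hS : pvS sep input_ids with
  | nil => exact absurd hS hne
  | cons h tl => simp [pvConsAll]

theorem pvS_no_sep (sep : Int) (l : List Int) (h : sep ∉ l) : pvS sep l = [l] := by
  induction l with
  | nil => simp [pvS]
  | cons t ts ih =>
    simp only [List.mem_cons, not_or] at h
    have : t ≠ sep := fun he => h.1 he.symm
    simp [pvS, this, ih h.2]

theorem pvS_split (sep : Int) (pre suf : List Int) (h : sep ∉ pre) :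
    pvS sep (pre ++ sep :: suf) = pre :: pvS sep suf := by
  induction pre with
  | nil => simp [pvS]
  | cons p pre' ih =>
    simp only [List.mem_cons, not_or] at h
    have hp : p ≠ sep := fun he => h.1 he.symm
    simp only [List.cons_append, pvS, if_neg hp, ih h.2]

theorem pvAltGo_eq (values : List Int) (sep : Int) :
    ∀ (start : Nat) (secs : List (List Int)),
      pvAltGo values sep start secs = secs ++ pvS sep (values.drop start) := by
  intro start
  induction hn : values.length - start using Nat.strong_induction_on generalizing start with
  | _ n ih =>
    intro secs
    rw [pvAltGo]
    split
    · next h =>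
      rw [PySem.List.index?_eq_none_iff] at h
      rw [pvS_no_sep sep _ h, PySem.List.slice_from_natCast]
    · next j h =>
      have hj := pv_index?_lt_length h
      rw [PySem.List.index?_eq_some_iff] at h
      obtain ⟨pre, suf, hdrop, hlen, hnot⟩ := h
      simp only [List.length_drop] at hj
      have hstart : start < values.length := by omega
      have hdropsuf : values.drop (start + j + 1) = suf := by
        have : values.drop (start + j + 1) = (values.drop start).drop (j + 1) := by
          rw [List.drop_drop]; ring_nf
        rw [this, hdrop, ← hlen]
        simp
      have htake : (values.drop start).take j = pre := by
        rw [hdrop, ← hlen]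
        simp
      rw [ih (values.length - (start + j + 1)) (by omega) (start + j + 1) rfl]
      rw [hdropsuf, PySem.List.slice_natCast]
      have : (start + j) - start = j := by omega
      rw [this, htake, hdrop, pvS_split sep pre suf hnot]
      simp

theorem pvB_eq_pvS (input_ids : List Int) (sep : Int) :
    split_reference_sections_py_alt input_ids sep = pvS sep input_ids := by
  unfold split_reference_sections_py_alt
  rw [pvAltGo_eq input_ids sep 0 []]
  simp

-- ===== VERDICT (by name: the statement is the Claim_ definition above) =====
theorem split_reference_sections_py_spec : Claim_equal_split_reference_sections_py := by
  intro input_ids sep _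
  unfold Spec_split_reference_sections_py
  rw [pvA_eq_pvS, pvB_eq_pvS]
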